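-- pv_equiv track=rewrite | github.com/HambokJiSu/PythonLib | test20220725.py | ufn_conv
-- ===== SOURCE A (Python) =====
-- def ufn_conv(n):
-- 	rtn = ""
-- 	tmp = 0
-- 	while n > 0:
-- 		tmp = n % 3
-- 		if tmp == 0:
-- 			tmp = 1
-- 		elif tmp == 1:
-- 			tmp = 2
-- 		else:
-- 			tmp = 4
--
-- 		rtn = str(tmp) + rtn
-- 		n//=3
-- 	return rtn
-- ===== SOURCE B (Python) =====
-- def ufn_conv(n):
--     if n <= 0:
--         return ""
--     m = n % 3
--     d = "1" if m == 0 else ("2" if m == 1 else "4")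
--     return ufn_conv(n // 3) + d
-- ===== Notes on version B (the rewrite author's own statement) =====
-- stated objective: simpler
-- what changed: Replaces the explicit while-loop with string-prepend accumulator by a direct recursive base-3 conversion that builds the string most-significant-digit-first by appending.
import Mathlib
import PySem

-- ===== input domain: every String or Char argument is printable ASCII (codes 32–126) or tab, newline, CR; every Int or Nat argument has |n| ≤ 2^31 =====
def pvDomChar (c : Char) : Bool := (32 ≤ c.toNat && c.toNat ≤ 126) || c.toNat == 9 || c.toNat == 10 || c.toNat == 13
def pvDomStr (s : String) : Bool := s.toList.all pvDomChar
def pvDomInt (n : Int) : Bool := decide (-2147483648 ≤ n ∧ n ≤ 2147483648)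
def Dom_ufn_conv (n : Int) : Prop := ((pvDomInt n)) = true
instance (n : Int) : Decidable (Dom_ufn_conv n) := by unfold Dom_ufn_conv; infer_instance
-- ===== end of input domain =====

-- B replaces A's while-loop with prepend accumulator by a direct recursion appending digits; objective: simpler.

theorem pv_floordiv3_toNat_lt (n : Int) (h : n > 0) :
    (PySem.Int.floordiv n 3).toNat < n.toNat := by
  rw [PySem.Int.floordiv_eq_ediv_of_pos (by omega)]
  have hd := Int.ediv_add_emod n 3
  have hm1 := Int.emod_nonneg n (show (3:Int) ≠ 0 by omega)
  have hm2 := Int.emod_lt_of_pos n (show (0:Int) < 3 by omega)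
  omega

-- ===== PORT A =====
def ufn_convLoop (n : Int) (rtn : String) : String :=
  if h : n > 0 then
    let tmp := PySem.Int.mod n 3
    let tmp2 : Int := if tmp = 0 then 1 else if tmp = 1 then 2 else 4
    ufn_convLoop (PySem.Int.floordiv n 3) (PySem.Int.toStr tmp2 ++ rtn)
  else rtn
termination_by n.toNat
decreasing_by exact pv_floordiv3_toNat_lt n h

def ufn_conv (n : Int) : String := ufn_convLoop n ""

-- ===== PORT B =====
def ufn_conv_alt (n : Int) : String :=
  if h : n ≤ 0 then ""
  else
    let m := PySem.Int.mod n 3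
    let d : String := if m = 0 then "1" else if m = 1 then "2" else "4"
    ufn_conv_alt (PySem.Int.floordiv n 3) ++ d
termination_by n.toNat
decreasing_by exact pv_floordiv3_toNat_lt n (by omega)

-- ===== PRECONDITION & SPEC =====
def Spec_ufn_conv (n : Int) (out : String) : Prop := out = ufn_conv_alt n
instance (n : Int) (out : String) : Decidable (Spec_ufn_conv n out) := by unfold Spec_ufn_conv; infer_instance

-- ===== CLAIM (what is proved, stated in full; the proofs are below) =====
def Claim_equal_ufn_conv : Prop := ∀ (n : Int), Dom_ufn_conv n → Spec_ufn_conv n (ufn_conv n)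

-- ===== LEMMAS AND PROOFS =====

-- ===== LEMMAS AND PROOFS =====

theorem pv_mod3_cases (n : Int) :
    PySem.Int.mod n 3 = 0 ∨ PySem.Int.mod n 3 = 1 ∨ PySem.Int.mod n 3 = 2 := by
  have h0 : PySem.Int.mod n 3 = n % 3 := PySem.Int.mod_eq_emod_of_pos (by omega)
  have := Int.emod_nonneg n (show (3:Int) ≠ 0 by omega)
  have := Int.emod_lt_of_pos n (show (0:Int) < 3 by omega)
  omega

theorem ufn_conv_loop_eq (k : Nat) : ∀ (n : Int), n.toNat ≤ k → ∀ (rtn : String),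
    ufn_convLoop n rtn = ufn_conv_alt n ++ rtn := by
  induction k with
  | zero =>
    intro n hn rtn
    rw [ufn_convLoop, ufn_conv_alt]
    have h : ¬ n > 0 := by omega
    simp [h, show n ≤ 0 by omega]
  | succ k ih =>
    intro n hn rtn
    rw [ufn_convLoop, ufn_conv_alt]
    by_cases h : n > 0
    · simp only [h, dif_pos, show ¬ n ≤ 0 by omega, dif_neg, not_false_iff]
      have hlt := pv_floordiv3_toNat_lt n h
      rw [ih _ (by omega)]
      rw [String.append_assoc]
      congr 1
      rcases pv_mod3_cases n with h1 | h1 | h1 <;> rw [h1] <;>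
        exact congrArg (· ++ rtn) (by decide)
    · simp [h, show n ≤ 0 by omega]

-- ===== VERDICT (by name: the statement is the Claim_ definition above) =====
theorem ufn_conv_spec : Claim_equal_ufn_conv := by
  intro n _
  unfold Spec_ufn_conv ufn_conv
  rw [ufn_conv_loop_eq n.toNat n le_rfl ""]
  simp
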